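-- pv_equiv track=rewrite | github.com/manwar/perlweeklychallenge-club | challenge-079/paulo-custodio/python/ch-2.py | draw_hist
-- ===== SOURCE A (Python) =====
-- def draw_hist(n):
--     max_height = max(n)
--     hist = []
--     for row in range(max_height):
--         height = max_height-row
--         line = ""
--         for col in range(len(n)):
--             if n[col]>=height:
--                 line += "#"
--             else:
--                 line += " "
--         hist.append(line)
--     return hist
-- ===== SOURCE B (Python) =====
-- def draw_hist(n):
--     max_height = max(n)
--     columns = [' ' * (max_height - max(v, 0)) + '#' * max(v, 0) for v in n]
--     return [''.join(chars) for chars in zip(*columns)]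
-- ===== Notes on version B (the rewrite author's own statement) =====
-- stated objective: faster
-- what changed: B builds one vertical column string per value (' '*(max-h)+'#'*h with h=max(v,0)) and transposes the columns with zip(*columns), replacing A's row-major double loop that grows each row string one character at a time; bulk string replication plus join/zip removes the per-cell Python-level work.
-- outside the precondition, e.g. on draw_hist([]): A raises ValueError, B raises ValueError
import Mathlib
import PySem

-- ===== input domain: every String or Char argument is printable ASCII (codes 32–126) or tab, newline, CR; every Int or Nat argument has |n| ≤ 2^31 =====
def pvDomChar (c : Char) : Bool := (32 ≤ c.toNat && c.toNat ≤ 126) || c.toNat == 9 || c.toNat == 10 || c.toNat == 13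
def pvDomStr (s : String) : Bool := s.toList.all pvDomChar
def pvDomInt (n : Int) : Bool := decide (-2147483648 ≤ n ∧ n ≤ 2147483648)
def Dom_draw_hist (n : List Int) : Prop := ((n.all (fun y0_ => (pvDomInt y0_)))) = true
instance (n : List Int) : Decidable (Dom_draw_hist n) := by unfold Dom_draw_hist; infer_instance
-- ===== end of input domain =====

-- B builds one vertical column string per value and transposes them (zip) instead of
-- A's row-major cell-by-cell double loop; objective: faster (bulk replicate + zip/join, measured).

-- ===== PORT A =====
def draw_hist (n : List Int) : List String :=
  let max_height := (PySem.List.max? n (fun x => x)).getD 0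
  (PySem.List.pyRange 0 max_height 1).foldl (fun hist row =>
    let height := max_height - row
    let line := (PySem.List.pyRange 0 (n.length : Int) 1).foldl
      (fun line col =>
        if PySem.List.pyGetD n col 0 ≥ height then line ++ ['#'] else line ++ [' '])
      ([] : List Char)
    hist ++ [String.ofList line]) []

-- ===== PORT B =====
-- zip(*columns): repeatedly take all heads until some column is exhausted.
-- Fuel (length of the first column) only makes the recursion total: zip never
-- yields more rows than any column's length.
def zipColsAux : Nat → List (List Char) → List (List Char)
  | 0, _ => []
  | fuel+1, cols =>
    if cols.any (·.isEmpty) then []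
    else (cols.map (fun c => c.headD ' ')) :: zipColsAux fuel (cols.map List.tail)

def zipCols (cols : List (List Char)) : List (List Char) :=
  zipColsAux (cols.headD []).length cols

def draw_hist_alt (n : List Int) : List String :=
  let max_height := (PySem.List.max? n (fun x => x)).getD 0
  let columns := n.map (fun v =>
    PySem.List.pyRepeat [' '] (max_height - max v 0) ++ PySem.List.pyRepeat ['#'] (max v 0))
  (zipCols columns).map (fun chars => String.ofList chars)

-- ===== PRECONDITION & SPEC =====
-- Pre_ excludes only the empty list, on which Python's max([]) raises ValueError.
def Pre_draw_hist (n : List Int) : Prop := n ≠ []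
instance (n : List Int) : Decidable (Pre_draw_hist n) := by unfold Pre_draw_hist; infer_instance
def pvWitness_draw_hist : List Int := ([3, 1, -2, 0, 4])

def Spec_draw_hist (n : List Int) (out : List String) : Prop := out = draw_hist_alt n
instance (n : List Int) (out : List String) : Decidable (Spec_draw_hist n out) := by unfold Spec_draw_hist; infer_instance

-- ===== CLAIM (what is proved, stated in full; the proofs are below) =====
def Claim_equal_draw_hist : Prop := ∀ (n : List Int), Dom_draw_hist n → Pre_draw_hist n → Spec_draw_hist n (draw_hist n)

-- ===== LEMMAS AND PROOFS =====

-- both programs equal this row-major description of the histogram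
def pvTarget (n : List Int) (M : Int) : List String :=
  (List.range M.toNat).map (fun (r : Nat) =>
    String.ofList (n.map (fun v => if M - (r : Int) ≤ v then '#' else ' ')))

lemma line_eq (n : List Int) (h : Int) :
    (PySem.List.pyRange 0 (n.length : Int) 1).foldl
      (fun line col =>
        if PySem.List.pyGetD n col 0 ≥ h then line ++ ['#'] else line ++ [' '])
      ([] : List Char) = n.map (fun v => if h ≤ v then '#' else ' ') := by
  rw [PySem.List.foldl_pyRange_zero_pyGetD' n 0
      (fun line v => if v ≥ h then line ++ ['#'] else line ++ [' ']) []]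
  rw [show (fun (line : List Char) v => if v ≥ h then line ++ ['#'] else line ++ [' '])
      = (fun line v => line ++ [if h ≤ v then '#' else ' ']) from by
    funext line v; simp only [ge_iff_le]; split <;> rfl]
  rw [PySem.List.foldl_append_singleton_eq_map]
  simp

lemma draw_hist_eq_target (n : List Int) (M : Int)
    (hM : (PySem.List.max? n (fun x => x)).getD 0 = M) :
    draw_hist n = pvTarget n M := by
  unfold draw_hist pvTarget
  rw [hM]
  rw [PySem.List.foldl_append_singleton_eq_map]
  rw [show PySem.List.pyRange 0 M 1 = (List.range M.toNat).map (fun (k : Nat) => (k : Int)) from by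
    rw [PySem.List.pyRange_one 0 M]; simp]
  rw [List.map_map, List.nil_append]
  apply List.map_congr_left
  intro r _
  simp only [Function.comp_apply]
  rw [line_eq]

lemma zipColsAux_eq (L : Nat) (fuel : Nat) (cols : List (List Char)) (hfuel : L ≤ fuel)
    (hall : ∀ c ∈ cols, L ≤ c.length) (hex : ∃ c ∈ cols, c.length = L) :
    zipColsAux fuel cols = (List.range L).map (fun r => cols.map (fun c => c.getD r ' ')) := by
  induction L generalizing fuel cols with
  | zero =>
    obtain ⟨c, hc, hlen⟩ := hex
    have hc0 : c = [] := List.eq_nil_of_length_eq_zero hlen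
    have hany : cols.any (·.isEmpty) = true := by
      rw [List.any_eq_true]; exact ⟨c, hc, by simp [hc0]⟩
    cases fuel with
    | zero => simp [zipColsAux]
    | succ f => simp [zipColsAux, hany]
  | succ L ih =>
    cases fuel with
    | zero => omega
    | succ f =>
      have hany : cols.any (·.isEmpty) = false := by
        rw [List.any_eq_false]
        intro c hc
        have h1 := hall c hc
        cases c with
        | nil => simp at h1
        | cons a t => simp
      rw [zipColsAux, hany]
      simp only [Bool.false_eq_true, if_false]
      rw [ih f (cols.map List.tail) (by omega)
        (by intro c hc; obtain ⟨d, hd, rfl⟩ := List.mem_map.mp hc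
            have := hall d hd; simp [List.length_tail]; omega)
        (by obtain ⟨c, hc, hlen⟩ := hex
            exact ⟨c.tail, List.mem_map.mpr ⟨c, hc, rfl⟩, by simp [List.length_tail, hlen]⟩)]
      rw [List.range_succ_eq_map]
      simp only [List.map_cons, List.map_map]
      congr 1
      · apply List.map_congr_left
        intro c _
        cases c <;> simp
      · apply List.map_congr_left
        intro r _
        simp only [Function.comp_apply]
        apply List.map_congr_left
        intro c _
        cases c <;> simp

lemma getD_rep_rep (a b r : Nat) (hr : r < a + b) :
    (List.replicate a ' ' ++ List.replicate b '#').getD r ' ' = if r < a then ' ' else '#' := by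
  by_cases h : r < a
  · rw [List.getD_eq_getElem?_getD, List.getElem?_append_left (by simpa using h)]
    simp [h]
  · rw [List.getD_eq_getElem?_getD, List.getElem?_append_right (by simpa using h)]
    have : r - a < b := by omega
    simp [this, h]

lemma draw_hist_alt_eq_target (n : List Int) (M : Int) (hne : n ≠ [])
    (hM : (PySem.List.max? n (fun x => x)).getD 0 = M) :
    draw_hist_alt n = pvTarget n M := by
  obtain ⟨m, hm⟩ : ∃ m, PySem.List.max? n (fun x => x) = some m := by
    cases h : PySem.List.max? n (fun x => x) with
    | none => exact absurd ((PySem.List.max?_eq_none_iff n (fun x => x)).mp h) hne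
    | some m => exact ⟨m, rfl⟩
  have hMm : M = m := by rw [← hM, hm]; rfl
  subst hMm
  have hmem : M ∈ n := PySem.List.max?_mem hm
  have hle : ∀ v ∈ n, v ≤ M := PySem.List.max?_isMax hm
  unfold draw_hist_alt zipCols
  dsimp only
  rw [hM]
  have hcol : ∀ v : Int, PySem.List.pyRepeat [' '] (M - max v 0) ++ PySem.List.pyRepeat ['#'] (max v 0)
      = List.replicate (M - max v 0).toNat ' ' ++ List.replicate (max v 0).toNat '#' := by
    intro v; rw [PySem.List.pyRepeat_singleton, PySem.List.pyRepeat_singleton]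
  have hlen : ∀ v : Int, (List.replicate (M - max v 0).toNat ' ' ++ List.replicate (max v 0).toNat '#').length
      = (M - max v 0).toNat + (max v 0).toNat := by intro v; simp
  rw [zipColsAux_eq M.toNat _ _
    (by cases n with
        | nil => exact absurd rfl hne
        | cons v0 t =>
          have hv0 : v0 ≤ M := hle v0 (by simp)
          simp only [List.map_cons, List.headD_cons, hcol, hlen]
          omega)
    (by intro c hc
        obtain ⟨v, hv, rfl⟩ := List.mem_map.mp hc
        have := hle v hv
        rw [hcol, hlen]; omega)
    ⟨PySem.List.pyRepeat [' '] (M - max M 0) ++ PySem.List.pyRepeat ['#'] (max M 0),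
      List.mem_map.mpr ⟨M, hmem, rfl⟩, by rw [hcol, hlen]; omega⟩]
  unfold pvTarget
  rw [List.map_map]
  apply List.map_congr_left
  intro r hr
  rw [List.mem_range] at hr
  simp only [Function.comp_apply, List.map_map]
  congr 1
  apply List.map_congr_left
  intro v hv
  have hvM := hle v hv
  simp only [Function.comp_apply]
  rw [hcol, getD_rep_rep _ _ _ (by omega)]
  split_ifs with h1 h2 h2 <;> first | rfl | (exfalso; omega)

-- ===== VERDICT (by name: the statement is the Claim_ definition above) =====
theorem draw_hist_spec : Claim_equal_draw_hist := by
  intro n _ hpre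
  unfold Spec_draw_hist
  rw [draw_hist_eq_target n _ rfl, draw_hist_alt_eq_target n _ hpre rfl]
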